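-- pv_equiv track=rewrite | github.com/itbench-hub/ITBench-SRE-Agent | sre_tools/offline_incident_analysis/traces/analyzer.py | _extract_service_path_from_trace
-- ===== SOURCE A (Python) =====
-- from typing import Any, Dict, List, Optional
--
-- def _extract_service_path_from_trace(spans: List[Dict[str, Any]]) -> List[str]:
--     """
--     Extract the collapsed service path from a trace's spans.
--     Uses parent_span_id to reconstruct the call hierarchy, then collapses consecutive same services.
--     Returns list of unique services in order (e.g., ['frontend', 'checkout', 'payment']).
--     """
--     if not spans:
--         return []
--
--     # Build span lookup and find root
--     span_map = {s["span_id"]: s for s in spans if s.get("span_id")}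
--     children_map: Dict[str, List[str]] = {}
--     roots = []
--
--     for s in spans:
--         sid = s.get("span_id")
--         pid = s.get("parent_span_id")
--         if pid and pid in span_map:
--             children_map.setdefault(pid, []).append(sid)
--         elif sid:
--             roots.append(sid)
--
--     if not roots:
--         return []
--
--     # DFS to find the longest path (leaf path)
--     def get_leaf_path(span_id: str) -> List[str]:
--         span = span_map.get(span_id)
--         if not span:
--             return []
--
--         svc = span.get("service_name", "unknown")
--         children = children_map.get(span_id, [])
--
--         if not children:
--             return [svc]
--
--         # Get the longest child path
--         longest = []
--         for child_id in children:
--             child_path = get_leaf_path(child_id)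
--             if len(child_path) > len(longest):
--                 longest = child_path
--
--         return [svc] + longest
--
--     # Get full path from first root
--     full_path = get_leaf_path(roots[0])
--
--     # Collapse consecutive same services
--     collapsed = []
--     prev = None
--     for svc in full_path:
--         if svc != prev:
--             collapsed.append(svc)
--             prev = svc
--
--     return collapsed
-- ===== SOURCE B (Python) =====
-- def _extract_service_path_from_trace(spans):
--     if not spans:
--         return []
--
--     span_map = {s["span_id"]: s for s in spans if s.get("span_id")}
--     children_map = {}
--     roots = []
--     for s in spans:
--         sid = s.get("span_id")
--         pid = s.get("parent_span_id")
--         if pid and pid in span_map: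
--             children_map.setdefault(pid, []).append(sid)
--         elif sid:
--             roots.append(sid)
--
--     if not roots:
--         return []
--
--     # Bottom-up dynamic programming instead of recursion: run len(span_map)
--     # relaxation rounds over all spans; after round k every span whose subtree
--     # depth is at most k holds its final longest service path (first-longest
--     # child wins), so best[roots[0]] is final once all rounds are done.
--     best = {}
--     for _ in range(len(span_map)):
--         for sid, span in span_map.items():
--             longest = []
--             for child in children_map.get(sid, []):
--                 path = best.get(child, [])
--                 if len(path) > len(longest):
--                     longest = path
--             best[sid] = [span.get("service_name", "unknown")] + longest
--
--     collapsed = []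
--     for svc in best[roots[0]]:
--         if not collapsed or collapsed[-1] != svc:
--             collapsed.append(svc)
--     return collapsed
-- ===== Notes on version B (the rewrite author's own statement) =====
-- stated objective: alternative
-- what changed: Replaces A's recursive DFS get_leaf_path with an iterative bottom-up dynamic program: len(span_map) relaxation rounds over all spans fill a memo dict with each span's longest service path (first-longest child wins, as with A's strict '>'), and the answer is read off at the first root; the span_map/children_map/roots construction and the collapse pass are kept. Pre_ excludes only inputs where a parent cycle is reachable from the first root (there A raises RecursionError).
import Mathlib
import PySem

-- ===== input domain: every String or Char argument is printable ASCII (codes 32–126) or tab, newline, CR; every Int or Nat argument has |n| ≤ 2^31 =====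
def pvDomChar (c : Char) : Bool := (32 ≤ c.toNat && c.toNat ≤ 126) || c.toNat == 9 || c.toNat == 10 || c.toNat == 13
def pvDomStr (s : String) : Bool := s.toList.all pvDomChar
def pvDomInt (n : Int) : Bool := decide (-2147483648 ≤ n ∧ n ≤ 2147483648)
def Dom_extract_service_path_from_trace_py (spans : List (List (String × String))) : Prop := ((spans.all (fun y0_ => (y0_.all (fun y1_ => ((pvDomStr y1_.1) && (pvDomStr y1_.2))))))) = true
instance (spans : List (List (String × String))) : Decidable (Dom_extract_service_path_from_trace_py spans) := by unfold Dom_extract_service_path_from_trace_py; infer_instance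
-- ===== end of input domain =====

-- B replaces A's recursive DFS by bottom-up relaxation rounds over a memo dict (different decomposition; objective: alternative).


-- ===== PORT A =====
-- shared helpers: s.get(k) on a span dict, Python truthiness of an optional string,
-- and the span_map / children_map / roots construction (these lines are identical in A and B)
def pvGet? (s : List (String × String)) (k : String) : Option String :=
  (PySem.Dict.ofList s).get? k

def pvTruthy (o : Option String) : Bool :=
  match o with
  | some v => v ≠ ""
  | none => false

def pvSvc (s : List (String × String)) : String :=
  (PySem.Dict.ofList s).getD "service_name" "unknown"

def pvSpanMap (spans : List (List (String × String))) :
    PySem.Dict String (List (String × String)) :=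
  spans.foldl (fun d s =>
    match pvGet? s "span_id" with
    | some sid => if sid ≠ "" then d.insert sid s else d
    | none => d) PySem.Dict.empty

def pvBuild (sm : PySem.Dict String (List (String × String)))
    (spans : List (List (String × String))) :
    PySem.Dict String (List (Option String)) × List String :=
  spans.foldl (fun st s =>
    let sid := pvGet? s "span_id"
    let pid := pvGet? s "parent_span_id"
    if pvTruthy pid && sm.contains (pid.getD "") then
      (st.1.insert (pid.getD "") (st.1.getD (pid.getD "") [] ++ [sid]), st.2)
    else if pvTruthy sid then (st.1, st.2 ++ [sid.getD ""]) else st)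
    (PySem.Dict.empty, [])

-- A's recursive get_leaf_path; the fuel argument only makes the recursion total,
-- Pre_ guarantees it is large enough (on cyclic inputs Python never returns)
def pvGetLeafPath (sm : PySem.Dict String (List (String × String)))
    (cm : PySem.Dict String (List (Option String))) :
    Nat → Option String → List String
  | _, none => []
  | 0, some _ => []
  | fuel+1, some sid =>
    match sm.get? sid with
    | none => []
    | some span =>
      let svc := pvSvc span
      let children := cm.getD sid []
      if children = [] then [svc]
      else svc :: children.foldl (fun longest c =>
        let cp := pvGetLeafPath sm cm fuel c
        if longest.length < cp.length then cp else longest) []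

def extract_service_path_from_trace_py (spans : List (List (String × String))) : List String :=
  if spans = [] then []
  else
    let sm := pvSpanMap spans
    let cr := pvBuild sm spans
    match cr.2 with
    | [] => []
    | r :: _ =>
      let full := pvGetLeafPath sm cr.1 (sm.keys.length + 1) (some r)
      (full.foldl (fun st svc => if some svc ≠ st.2 then (st.1 ++ [svc], some svc) else st)
        (([] : List String), (none : Option String))).1

-- ===== PORT B =====
-- one relaxation round: recompute every span's longest service path from the memo
def pvRound (sm : PySem.Dict String (List (String × String)))
    (cm : PySem.Dict String (List (Option String)))
    (best : PySem.Dict String (List String)) : PySem.Dict String (List String) :=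
  sm.items.foldl (fun best it =>
    let longest := (cm.getD it.1 []).foldl (fun longest c =>
      let p := match c with | some cs => best.getD cs [] | none => []
      if longest.length < p.length then p else longest) []
    best.insert it.1 (pvSvc it.2 :: longest)) best

def extract_service_path_from_trace_py_alt (spans : List (List (String × String))) : List String :=
  if spans = [] then []
  else
    let sm := pvSpanMap spans
    let cr := pvBuild sm spans
    match cr.2 with
    | [] => []
    | r :: _ =>
      let best := (List.range sm.keys.length).foldl (fun b _ => pvRound sm cr.1 b) PySem.Dict.empty
      (best.getD r []).foldl (fun out svc =>
        if out = [] ∨ out.getLast? ≠ some svc then out ++ [svc] else out) []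

-- ===== PRECONDITION & SPEC =====
-- child span-ids of a span-map key that are themselves span-map keys (the edges A recurses through)
def pvKids (sm : PySem.Dict String (List (String × String)))
    (cm : PySem.Dict String (List (Option String))) (id : String) : List String :=
  (cm.getD id []).filterMap (fun c =>
    match c with
    | some cs => if (sm.get? cs).isSome then some cs else none
    | none => none)

-- Kahn-style readiness rounds: pvRk k = keys whose descendant subgraph is well-founded within k rounds
def pvRk (sm : PySem.Dict String (List (String × String)))
    (cm : PySem.Dict String (List (Option String))) : Nat → List String
  | 0 => []
  | k+1 => sm.keys.filter (fun id => (pvKids sm cm id).all (fun c => (pvRk sm cm k).contains c))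

-- Pre_ excludes exactly the inputs on which a parent-pointer cycle is reachable from the first
-- root: there A's recursion never returns (Python raises RecursionError), so nothing is claimed.
def Pre_extract_service_path_from_trace_py (spans : List (List (String × String))) : Prop :=
  ((pvBuild (pvSpanMap spans) spans).2.head?.all (fun r =>
    (pvRk (pvSpanMap spans) (pvBuild (pvSpanMap spans) spans).1 (pvSpanMap spans).keys.length).contains r)) = true

instance (spans : List (List (String × String))) : Decidable (Pre_extract_service_path_from_trace_py spans) := by
  unfold Pre_extract_service_path_from_trace_py; infer_instance

def pvWitness_extract_service_path_from_trace_py : (List (List (String × String))) :=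
  [[("span_id", "a"), ("service_name", "frontend")],
   [("span_id", "b"), ("parent_span_id", "a"), ("service_name", "backend")]]

def Spec_extract_service_path_from_trace_py (spans : List (List (String × String))) (out : List String) : Prop :=
  out = extract_service_path_from_trace_py_alt spans

instance (spans : List (List (String × String))) (out : List String) : Decidable (Spec_extract_service_path_from_trace_py spans out) := by
  unfold Spec_extract_service_path_from_trace_py; infer_instance

-- ===== CLAIM (what is proved, stated in full; the proofs are below) =====
def Claim_equal_extract_service_path_from_trace_py : Prop :=
  ∀ (spans : List (List (String × String))), Dom_extract_service_path_from_trace_py spans →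
    Pre_extract_service_path_from_trace_py spans →
    Spec_extract_service_path_from_trace_py spans (extract_service_path_from_trace_py spans)

-- ===== LEMMAS AND PROOFS =====

lemma pvGLP_none (sm : PySem.Dict String (List (String × String)))
    (cm : PySem.Dict String (List (Option String))) (cs : String)
    (h : sm.get? cs = none) (g : Nat) : pvGetLeafPath sm cm g (some cs) = [] := by
  cases g with
  | zero => rfl
  | succ f => simp [pvGetLeafPath, h]

lemma pvGLP_none_opt (sm : PySem.Dict String (List (String × String)))
    (cm : PySem.Dict String (List (Option String))) (g : Nat) :
    pvGetLeafPath sm cm g none = [] := by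
  cases g <;> rfl

lemma mem_pvRk_succ_iff (sm : PySem.Dict String (List (String × String)))
    (cm : PySem.Dict String (List (Option String))) (k : Nat) (id : String) :
    id ∈ pvRk sm cm (k+1) ↔ id ∈ sm.keys ∧ ∀ c ∈ pvKids sm cm id, c ∈ pvRk sm cm k := by
  simp [pvRk, List.mem_filter, List.all_eq_true]

lemma pvRk_subset_keys (sm : PySem.Dict String (List (String × String)))
    (cm : PySem.Dict String (List (Option String))) (k : Nat) (id : String)
    (h : id ∈ pvRk sm cm k) : id ∈ sm.keys := by
  cases k with
  | zero => simp [pvRk] at h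
  | succ k => exact ((mem_pvRk_succ_iff sm cm k id).mp h).1

lemma pvRk_subset_succ (sm : PySem.Dict String (List (String × String)))
    (cm : PySem.Dict String (List (Option String))) (k : Nat) :
    ∀ id ∈ pvRk sm cm k, id ∈ pvRk sm cm (k+1) := by
  induction k with
  | zero => intro id h; simp [pvRk] at h
  | succ k ih =>
    intro id h
    rw [mem_pvRk_succ_iff] at h ⊢
    exact ⟨h.1, fun c hc => ih c (h.2 c hc)⟩

lemma pvMem_keys_of_get? (sm : PySem.Dict String (List (String × String)))
    (id : String) (span : List (String × String)) (h : sm.get? id = some span) :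
    id ∈ sm.keys := by
  by_contra hm
  rw [← PySem.Dict.get?_eq_none_iff_not_mem_keys] at hm
  simp [h] at hm

lemma pvGet?_isSome_of_mem_keys (sm : PySem.Dict String (List (String × String)))
    (id : String) (h : id ∈ sm.keys) : ∃ span, sm.get? id = some span := by
  cases hq : sm.get? id with
  | none => exact absurd ((PySem.Dict.get?_eq_none_iff_not_mem_keys sm id).mp hq) (not_not_intro h)
  | some s => exact ⟨s, rfl⟩

lemma pvGLP_stable (sm : PySem.Dict String (List (String × String)))
    (cm : PySem.Dict String (List (Option String))) :
    ∀ (k : Nat) (id : String), id ∈ pvRk sm cm k → ∀ f, k ≤ f →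
      pvGetLeafPath sm cm f (some id) = pvGetLeafPath sm cm k (some id) := by
  intro k
  induction k with
  | zero => intro id h; simp [pvRk] at h
  | succ k ih =>
    intro id h f hf
    rw [mem_pvRk_succ_iff] at h
    obtain ⟨hk, hkids⟩ := h
    obtain ⟨f, rfl⟩ : ∃ f', f = f' + 1 := ⟨f - 1, by omega⟩
    obtain ⟨span, hspan⟩ := pvGet?_isSome_of_mem_keys sm id hk
    simp only [pvGetLeafPath, hspan]
    by_cases hc : cm.getD id [] = []
    · simp [hc]
    · simp only [if_neg hc]
      congr 1
      apply PySem.List.foldl_congr_mem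
      intro acc c hcmem
      cases c with
      | none => simp [pvGLP_none_opt]
      | some cs =>
        cases hq : sm.get? cs with
        | none => simp [pvGLP_none sm cm cs hq]
        | some s2 =>
          have hkid : cs ∈ pvKids sm cm id := by
            simp only [pvKids, List.mem_filterMap]
            exact ⟨some cs, hcmem, by simp [hq]⟩
          have h2 := hkids cs hkid
          simp only [ih cs h2 f (by omega)]

lemma pvRoundVal (sm : PySem.Dict String (List (String × String)))
    (cm : PySem.Dict String (List (Option String))) (N m : Nat) (hm : m ≤ N)
    (best : PySem.Dict String (List String))
    (hb : ∀ j ∈ pvRk sm cm m, best.getD j [] = pvGetLeafPath sm cm (N+1) (some j))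
    (hb2 : ∀ j, j ∉ sm.keys → best.getD j [] = [])
    (id : String) (span : List (String × String))
    (hid : id ∈ pvRk sm cm (m+1)) (hspan : sm.get? id = some span) :
    (pvSvc span :: (cm.getD id []).foldl (fun longest c =>
        let p := match c with | some cs => best.getD cs [] | none => []
        if longest.length < p.length then p else longest) [])
      = pvGetLeafPath sm cm (N+1) (some id) := by
  rw [pvGLP_stable sm cm (m+1) id hid (N+1) (by omega)]
  rw [mem_pvRk_succ_iff] at hid
  obtain ⟨hk, hkids⟩ := hid
  simp only [pvGetLeafPath, hspan]
  by_cases hc : cm.getD id [] = []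
  · simp [hc]
  · simp only [if_neg hc]
    congr 1
    apply PySem.List.foldl_congr_mem
    intro acc c hcmem
    cases c with
    | none => simp [pvGLP_none_opt]
    | some cs =>
      cases hq : sm.get? cs with
      | none =>
        have hnk : cs ∉ sm.keys := (PySem.Dict.get?_eq_none_iff_not_mem_keys sm cs).mp hq
        simp [pvGLP_none sm cm cs hq, hb2 cs hnk]
      | some s2 =>
        have hkid : cs ∈ pvKids sm cm id := by
          simp only [pvKids, List.mem_filterMap]
          exact ⟨some cs, hcmem, by simp [hq]⟩
        have h2 := hkids cs hkid
        have := hb cs h2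
        rw [pvGLP_stable sm cm m cs h2 (N+1) (by omega)] at this
        simp only [this]

lemma pvRoundFold (sm : PySem.Dict String (List (String × String)))
    (cm : PySem.Dict String (List (Option String))) (N m : Nat) (hm : m ≤ N) :
    ∀ (its : List (String × List (String × String))) (b : PySem.Dict String (List String)),
      (∀ j ∈ pvRk sm cm m, b.getD j [] = pvGetLeafPath sm cm (N+1) (some j)) →
      (∀ j, j ∉ sm.keys → b.getD j [] = []) →
      (∀ pr ∈ its, sm.get? pr.1 = some pr.2) →
      (∀ id ∈ pvRk sm cm (m+1), id ∉ its.map Prod.fst →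
        b.getD id [] = pvGetLeafPath sm cm (N+1) (some id)) →
      (∀ id ∈ pvRk sm cm (m+1),
        (its.foldl (fun best it =>
          let longest := (cm.getD it.1 []).foldl (fun longest c =>
            let p := match c with | some cs => best.getD cs [] | none => []
            if longest.length < p.length then p else longest) []
          best.insert it.1 (pvSvc it.2 :: longest)) b).getD id []
          = pvGetLeafPath sm cm (N+1) (some id)) ∧
      (∀ j, j ∉ sm.keys →
        (its.foldl (fun best it =>
          let longest := (cm.getD it.1 []).foldl (fun longest c =>
            let p := match c with | some cs => best.getD cs [] | none => []
            if longest.length < p.length then p else longest) []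
          best.insert it.1 (pvSvc it.2 :: longest)) b).getD j [] = []) := by
  intro its
  induction its with
  | nil =>
    intro b h1 h2 h3 h4
    exact ⟨fun id hid => h4 id hid (by simp), h2⟩
  | cons pr rest ih =>
    intro b h1 h2 h3 h4
    simp only [List.foldl_cons]
    have hpr : sm.get? pr.1 = some pr.2 := h3 pr (by simp)
    have hkmem : pr.1 ∈ sm.keys := pvMem_keys_of_get? sm pr.1 pr.2 hpr
    set val := pvSvc pr.2 :: (cm.getD pr.1 []).foldl (fun longest c =>
      let p := match c with | some cs => b.getD cs [] | none => []
      if longest.length < p.length then p else longest) [] with hval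
    have hget : ∀ j, (b.insert pr.1 val).getD j [] = if j = pr.1 then val else b.getD j [] :=
      fun j => PySem.Dict.getD_insert b pr.1 j val []
    have hnewval : pr.1 ∈ pvRk sm cm (m+1) → val = pvGetLeafPath sm cm (N+1) (some pr.1) := by
      intro hin
      rw [hval]
      exact pvRoundVal sm cm N m hm b h1 h2 pr.1 pr.2 hin hpr
    refine ih (b.insert pr.1 val) ?_ ?_ ?_ ?_
    · intro j hj
      rw [hget j]
      by_cases hje : j = pr.1
      · subst hje; rw [if_pos rfl]; exact hnewval (pvRk_subset_succ sm cm m _ hj)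
      · rw [if_neg hje]; exact h1 j hj
    · intro j hj
      rw [hget j, if_neg (by rintro rfl; exact hj hkmem)]
      exact h2 j hj
    · intro q hq; exact h3 q (by simp [hq])
    · intro id hid hnmem
      rw [hget id]
      by_cases hje : id = pr.1
      · subst hje; rw [if_pos rfl]; exact hnewval hid
      · rw [if_neg hje]
        refine h4 id hid ?_
        simp only [List.map_cons, List.mem_cons]
        rintro (h | h)
        · exact hje h
        · exact hnmem h

lemma pvKeys_eq_items_map (sm : PySem.Dict String (List (String × String))) :
    sm.items.map Prod.fst = sm.keys := rfl

lemma pvRound_preserves (sm : PySem.Dict String (List (String × String)))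
    (cm : PySem.Dict String (List (Option String))) (N m : Nat) (hm : m ≤ N)
    (hnd : sm.keys.Nodup) (b : PySem.Dict String (List String))
    (h1 : ∀ j ∈ pvRk sm cm m, b.getD j [] = pvGetLeafPath sm cm (N+1) (some j))
    (h2 : ∀ j, j ∉ sm.keys → b.getD j [] = []) :
    (∀ id ∈ pvRk sm cm (m+1),
      (pvRound sm cm b).getD id [] = pvGetLeafPath sm cm (N+1) (some id)) ∧
    (∀ j, j ∉ sm.keys → (pvRound sm cm b).getD j [] = []) := by
  have := pvRoundFold sm cm N m hm sm.items b h1 h2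
    (fun pr hpr => PySem.Dict.get?_of_mem_items sm (k := pr.1) (v := pr.2) (by simpa using hpr) hnd)
    (fun id hid hnot => by
      have hk := pvRk_subset_keys sm cm (m+1) id hid
      rw [← pvKeys_eq_items_map] at hk
      exact absurd hk hnot)
  exact this

lemma pvIter_inv (sm : PySem.Dict String (List (String × String)))
    (cm : PySem.Dict String (List (Option String))) (hnd : sm.keys.Nodup) :
    ∀ j, j ≤ sm.keys.length →
      (∀ id ∈ pvRk sm cm j,
        ((List.range j).foldl (fun b _ => pvRound sm cm b) PySem.Dict.empty).getD id []
          = pvGetLeafPath sm cm (sm.keys.length + 1) (some id)) ∧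
      (∀ k, k ∉ sm.keys →
        ((List.range j).foldl (fun b _ => pvRound sm cm b) PySem.Dict.empty).getD k [] = []) := by
  intro j
  induction j with
  | zero =>
    intro _
    constructor
    · intro id hid; simp [pvRk] at hid
    · intro k _; simp [PySem.Dict.getD_empty]
  | succ j ih =>
    intro hj
    rw [List.range_succ, List.foldl_append]
    simp only [List.foldl_cons, List.foldl_nil]
    exact pvRound_preserves sm cm sm.keys.length j (by omega) hnd _
      (ih (by omega)).1 (ih (by omega)).2

lemma pvSpanMap_keys_nodup (spans : List (List (String × String))) :
    (pvSpanMap spans).keys.Nodup := by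
  unfold pvSpanMap
  suffices h : ∀ (d : PySem.Dict String (List (String × String))), d.keys.Nodup →
      (spans.foldl (fun d s =>
        match pvGet? s "span_id" with
        | some sid => if sid ≠ "" then d.insert sid s else d
        | none => d) d).keys.Nodup from
    h PySem.Dict.empty PySem.Dict.nodup_keys_empty
  induction spans with
  | nil => intro d hd; exact hd
  | cons s rest ih =>
    intro d hd
    simp only [List.foldl_cons]
    apply ih
    cases pvGet? s "span_id" with
    | none => exact hd
    | some sid =>
      by_cases hs : sid = ""
      · simp [hs, hd]
      · simpa [hs] using PySem.Dict.nodup_keys_insert d sid s hd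

lemma pvCollapse_eq : ∀ (l acc : List String) (prev : Option String), prev = acc.getLast? →
    (l.foldl (fun st svc => if some svc ≠ st.2 then (st.1 ++ [svc], some svc) else st) (acc, prev)).1
      = l.foldl (fun out svc => if out = [] ∨ out.getLast? ≠ some svc then out ++ [svc] else out) acc := by
  intro l
  induction l with
  | nil => intro acc prev h; rfl
  | cons x t ih =>
    intro acc prev h
    subst h
    simp only [List.foldl_cons]
    by_cases ha : acc = []
    · subst ha
      rw [if_pos (by simp), if_pos (by simp)]
      exact ih [x] (some x) (by simp)
    · cases hl : acc.getLast? with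
      | none => exact absurd (List.getLast?_eq_none_iff.mp hl) ha
      | some last =>
        by_cases hx : x = last
        · subst hx
          rw [if_neg (by simp), if_neg (by simp [ha])]
          exact ih acc (some x) hl.symm
        · rw [if_pos (by simpa using hx), if_pos (Or.inr (by simpa using Ne.symm hx))]
          exact ih (acc ++ [x]) (some x) (by simp)

-- ===== VERDICT (by name: the statement is the Claim_ definition above) =====
theorem extract_service_path_from_trace_py_spec : Claim_equal_extract_service_path_from_trace_py := by
  intro spans _ hpre
  unfold Spec_extract_service_path_from_trace_py
  unfold Pre_extract_service_path_from_trace_py at hpre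
  simp only [extract_service_path_from_trace_py, extract_service_path_from_trace_py_alt]
  by_cases hs : spans = []
  · simp [hs]
  · simp only [if_neg hs]
    cases hr : (pvBuild (pvSpanMap spans) spans).2 with
    | nil => rfl
    | cons r t =>
      rw [hr] at hpre
      simp only [List.head?_cons, Option.all_some] at hpre
      have hmem : r ∈ pvRk (pvSpanMap spans) (pvBuild (pvSpanMap spans) spans).1
          (pvSpanMap spans).keys.length := List.contains_iff_mem.mp hpre
      dsimp only
      rw [(pvIter_inv (pvSpanMap spans) (pvBuild (pvSpanMap spans) spans).1
        (pvSpanMap_keys_nodup spans) (pvSpanMap spans).keys.length (le_refl _)).1 r hmem]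
      exact pvCollapse_eq _ [] none rfl
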